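-- pv_equiv track=rewrite | github.com/anilakash/IndKGC | subgraph_extraction/extract_rule_paths.py | check_simple_path
-- ===== SOURCE A (Python) =====
-- def check_simple_path(rule_ins):
--     nodes = []
--     flag = 1
--     for i in range(len(rule_ins)):
--         if i % 2 == 0:
--             nodes.append(rule_ins[i])
--     for n in nodes:
--         if nodes.count(n)>1:
--             flag = 0
--     return flag
-- ===== SOURCE B (Python) =====
-- def check_simple_path(rule_ins):
--     # walk the list two at a time collecting even-indexed elements,
--     # then sort a copy and scan once for an equal adjacent pair
--     nodes = []
--     rest = rule_ins
--     while rest: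
--         nodes.append(rest[0])
--         rest = rest[2:]
--     s = sorted(nodes)
--     for i in range(1, len(s)):
--         if s[i] == s[i - 1]:
--             return 0
--     return 1
-- ===== Notes on version B (the rewrite author's own statement) =====
-- stated objective: faster
-- what changed: Replaces the index loop plus per-element count-scan with a two-at-a-time walk collecting even-indexed elements, then a sort and a single adjacent-equality pass.
import Mathlib
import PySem

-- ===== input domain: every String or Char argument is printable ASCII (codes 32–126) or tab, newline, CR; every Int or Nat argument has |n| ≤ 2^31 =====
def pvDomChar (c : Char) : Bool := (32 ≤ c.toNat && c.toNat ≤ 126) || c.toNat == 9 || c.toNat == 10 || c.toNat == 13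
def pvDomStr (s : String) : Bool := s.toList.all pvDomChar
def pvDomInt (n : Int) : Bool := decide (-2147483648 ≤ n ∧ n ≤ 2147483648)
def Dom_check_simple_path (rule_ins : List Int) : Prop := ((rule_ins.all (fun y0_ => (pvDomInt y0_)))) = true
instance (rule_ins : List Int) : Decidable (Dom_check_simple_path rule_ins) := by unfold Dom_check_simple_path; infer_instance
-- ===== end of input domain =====

-- B replaces A's index loop and quadratic per-element count-scan by a two-at-a-time walk
-- collecting even-indexed elements, then a sort and one adjacent-equality pass.

-- ===== PORT A =====
def check_simple_path (rule_ins : List Int) : Int :=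
  let nodes := (PySem.List.pyRange 0 rule_ins.length 1).foldl
    (fun ns i => if PySem.Int.mod i 2 == 0 then ns ++ [PySem.List.pyGetD rule_ins i 0] else ns) []
  nodes.foldl (fun flag n => if PySem.List.count nodes n > 1 then 0 else flag) 1

-- ===== PORT B =====
-- 'while rest: nodes.append(rest[0]); rest = rest[2:]'
def pvTakeEvens : List Int → List Int
  | [] => []
  | [x] => [x]
  | x :: _ :: t => x :: pvTakeEvens t

-- 'for i in range(1, len(s)): if s[i] == s[i-1]: return 0' then 'return 1'
def pvAdjScan : List Int → Int
  | a :: b :: t => if a == b then 0 else pvAdjScan (b :: t)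
  | _ => 1

def check_simple_path_alt (rule_ins : List Int) : Int :=
  pvAdjScan (PySem.List.sorted (pvTakeEvens rule_ins) (fun x => x) false)

-- ===== PRECONDITION & SPEC =====
def Spec_check_simple_path (rule_ins : List Int) (out : Int) : Prop := out = check_simple_path_alt rule_ins
instance (rule_ins : List Int) (out : Int) : Decidable (Spec_check_simple_path rule_ins out) := by unfold Spec_check_simple_path; infer_instance

-- ===== CLAIM (what is proved, stated in full; the proofs are below) =====
def Claim_equal_check_simple_path : Prop := ∀ (rule_ins : List Int), Dom_check_simple_path rule_ins → Spec_check_simple_path rule_ins (check_simple_path rule_ins)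

-- ===== LEMMAS AND PROOFS =====

-- A's first loop builds exactly the even-indexed elements
theorem nodes_eq_takeEvens (xs : List Int) :
    (PySem.List.pyRange 0 xs.length 1).foldl
      (fun ns i => if PySem.Int.mod i 2 == 0 then ns ++ [PySem.List.pyGetD xs i 0] else ns) []
    = pvTakeEvens xs := by
  rw [PySem.List.foldl_append_if]
  simp only [List.nil_append]
  fun_induction pvTakeEvens xs with
  | case1 => simp
  | case2 x =>
      rw [show ((([x]:List Int).length : Int)) = 1 by simp,
        PySem.List.pyRange_one_cons (by norm_num), PySem.List.pyRange_one_eq_nil (by norm_num)]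
      simp [PySem.Int.mod]
  | case3 x y t ih =>
      rw [show (((x :: y :: t).length : Int)) = (t.length : Int) + 2 by push_cast [List.length_cons]; ring,
        PySem.List.pyRange_one_cons (by omega),
        PySem.List.pyRange_one_cons (by omega)]
      norm_num
      simp only [show ∀ i : Int, (PySem.Int.mod i 2 == 0) = (i % 2 == 0) from
        fun i => by rw [PySem.Int.mod_eq_emod_of_pos (by norm_num)]] at ih
      rw [PySem.List.pyRange_one 2 ((t.length : Int) + 2)]
      rw [PySem.List.pyRange_one 0 (t.length : Int)] at ih
      rw [show ((t.length : Int) + 2 - 2).toNat = t.length by omega]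
      rw [show ((t.length : Int) - 0).toNat = t.length by omega] at ih
      simp only [List.filter_map, List.map_map] at *
      rw [← ih]
      have hpred : ∀ k ∈ List.range t.length, ((fun i : Int => i % 2 == 0) ∘ fun k : Nat => 2 + (k:Int)) k
          = ((fun i : Int => i % 2 == 0) ∘ fun k : Nat => 0 + (k:Int)) k := by
        intro k _
        simp only [Function.comp]
        congr 1
        omega
      rw [List.filter_congr hpred]
      apply List.map_congr_left
      intro k hk
      simp only [Function.comp_apply]
      rw [show (2 + (k:Int)) = ((k+2 : Nat) : Int) by push_cast; ring,
        PySem.List.pyGetD_natCast, show (0 + (k:Int)) = ((k : Nat) : Int) by ring,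
        PySem.List.pyGetD_natCast]
      simp [List.getD]

-- A's second loop zeroes the flag iff some element satisfies the test
theorem foldl_flag_eq (l : List Int) (p : Int → Prop) [DecidablePred p] (f : Int) :
    l.foldl (fun flag n => if p n then (0:Int) else flag) f
    = if ∃ n ∈ l, p n then 0 else f := by
  induction l generalizing f with
  | nil => simp
  | cons a t ih =>
      simp only [List.foldl_cons, ih]
      by_cases ha : p a
      · simp [ha]
      · simp [ha]

-- the adjacent-equality scan on a ≤-sorted list decides Nodup
theorem adjScan_sorted (s : List Int) (hs : s.Pairwise (· ≤ ·)) :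
    pvAdjScan s = if s.Nodup then 1 else 0 := by
  fun_induction pvAdjScan s with
  | case1 a b t hab =>
      simp only [beq_iff_eq] at hab
      subst hab
      simp
  | case2 a b t hab ih =>
      simp only [beq_iff_eq] at hab
      rw [ih hs.tail]
      have hna : a ∉ b :: t := by
        intro h
        rcases List.mem_cons.mp h with h1 | h2
        · exact hab h1
        · exact hab (le_antisymm ((List.pairwise_cons.mp hs).1 b (List.mem_cons_self ..))
            ((List.pairwise_cons.mp hs.tail).1 a h2))
      simp [List.nodup_cons, hna]
  | case3 x h =>
      match x, h with
      | [], _ => simp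
      | [a], _ => simp
      | a :: b :: t, h => exact absurd rfl (h a b t)

theorem check_simple_path_spec : Claim_equal_check_simple_path := by
  intro xs _
  unfold Spec_check_simple_path check_simple_path check_simple_path_alt
  rw [nodes_eq_takeEvens]
  set N := pvTakeEvens xs with hN
  rw [foldl_flag_eq N (fun n => PySem.List.count N n > 1) 1]
  rw [adjScan_sorted _ (by simpa using PySem.List.sorted_pairwise N (fun x => x) )]
  have hperm : (PySem.List.sorted N (fun x => x) false).Perm N := PySem.List.sorted_perm ..
  simp only [hperm.nodup_iff]
  have hiff : (∃ n ∈ N, PySem.List.count N n > 1) ↔ ¬ N.Nodup := by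
    rw [List.nodup_iff_count_le_one]
    constructor
    · rintro ⟨n, _, hn⟩ h
      have := h n
      rw [PySem.List.count_eq] at hn
      omega
    · intro h
      push Not at h
      obtain ⟨a, ha⟩ := h
      refine ⟨a, ?_, ?_⟩
      · exact List.count_pos_iff.mp (by omega)
      · rw [PySem.List.count_eq]; omega
  by_cases hnd : N.Nodup
  · rw [if_pos hnd, if_neg (fun h => (hiff.mp h) hnd)]
  · rw [if_neg hnd, if_pos (hiff.mpr hnd)]
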